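-- pv_equiv track=rewrite | github.com/wlough/MeshBrane | meshbrane/init_functions.py | get_faces_of_vertices
-- ===== SOURCE A (Python) =====
-- def get_faces_of_vertices(vertices, faces):
--     Nfaces = len(faces)
--     Nvertices = len(vertices)
--     faces_of_vertices = []
--     for v in range(Nvertices):
--         faces_of_vertices.append([])
--         for f in range(Nfaces):
--             if v in faces[f]:
--                 faces_of_vertices[-1].append(f)
--     return faces_of_vertices
-- ===== SOURCE B (Python) =====
-- def get_faces_of_vertices(vertices, faces):
--     n = len(vertices)
--     res = [[] for _ in range(n)]
--     for f, face in enumerate(faces):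
--         for v in dict.fromkeys(face):
--             if 0 <= v < n:
--                 res[v].append(f)
--     return res
-- ===== Notes on version B (the rewrite author's own statement) =====
-- stated objective: faster
-- what changed: Replaces the nested scan (for every vertex index, scan all faces) by a single pass over the faces that appends each face index to the buckets of its (deduplicated, in-range) vertices.
import Mathlib
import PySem

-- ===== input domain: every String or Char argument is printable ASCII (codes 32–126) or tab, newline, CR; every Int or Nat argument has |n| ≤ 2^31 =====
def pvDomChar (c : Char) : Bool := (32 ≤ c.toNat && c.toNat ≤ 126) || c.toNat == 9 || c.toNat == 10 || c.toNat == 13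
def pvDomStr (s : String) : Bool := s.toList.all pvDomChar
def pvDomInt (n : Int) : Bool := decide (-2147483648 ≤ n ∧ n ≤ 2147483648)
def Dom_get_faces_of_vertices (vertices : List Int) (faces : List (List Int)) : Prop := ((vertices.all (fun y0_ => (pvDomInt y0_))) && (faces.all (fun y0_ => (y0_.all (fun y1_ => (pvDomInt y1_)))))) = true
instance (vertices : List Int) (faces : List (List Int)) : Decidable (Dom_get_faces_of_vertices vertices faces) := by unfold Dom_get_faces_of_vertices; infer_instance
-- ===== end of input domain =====

-- B replaces A's vertex-by-vertex scan of all faces with one pass over the faces,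
-- appending each face index to the buckets of its deduplicated in-range vertices (faster: asymptotic, in a timing run).


-- ===== PORT A =====
-- literal port of A: for v in range(len(vertices)): start a new bucket, then
-- for f in range(len(faces)): if v in faces[f]: append f to the last bucket
def get_faces_of_vertices (vertices : List Int) (faces : List (List Int)) : List (List Int) :=
  (PySem.List.pyRange 0 (vertices.length : Int) 1).foldl
    (fun acc v =>
      acc ++ [(PySem.List.pyRange 0 (faces.length : Int) 1).foldl
        (fun cur f => if (PySem.List.pyGetD faces f []).contains v then cur ++ [f] else cur) []])
    []

-- ===== PORT B =====
-- res[v].append(f)  (v a Nat index known in range)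
def pvAppendAt : List (List Int) → Nat → Int → List (List Int)
  | [], _, _ => []
  | b :: bs, 0, f => (b ++ [f]) :: bs
  | b :: bs, Nat.succ k, f => b :: pvAppendAt bs k f

-- inner loop: for v in dict.fromkeys(face): if 0 <= v < n: res[v].append(f)
def pvAddFace (n : Nat) (res : List (List Int)) (f : Int) (face : List Int) : List (List Int) :=
  (PySem.List.dedup face).foldl
    (fun r v => if 0 ≤ v ∧ v < (n : Int) then pvAppendAt r v.toNat f else r) res

def get_faces_of_vertices_alt (vertices : List Int) (faces : List (List Int)) : List (List Int) :=
  (PySem.List.enumerate faces 0).foldl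
    (fun r p => pvAddFace vertices.length r p.1 p.2)
    (List.replicate vertices.length [])

-- ===== PRECONDITION & SPEC =====
def Spec_get_faces_of_vertices (vertices : List Int) (faces : List (List Int)) (out : List (List Int)) : Prop := out = get_faces_of_vertices_alt vertices faces
instance (vertices : List Int) (faces : List (List Int)) (out : List (List Int)) : Decidable (Spec_get_faces_of_vertices vertices faces out) := by unfold Spec_get_faces_of_vertices; infer_instance

-- ===== CLAIM (what is proved, stated in full; the proofs are below) =====
def Claim_equal_get_faces_of_vertices : Prop := ∀ (vertices : List Int) (faces : List (List Int)), Dom_get_faces_of_vertices vertices faces → Spec_get_faces_of_vertices vertices faces (get_faces_of_vertices vertices faces)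

-- ===== LEMMAS AND PROOFS =====

theorem pvAppendAt_length (r : List (List Int)) (k : Nat) (f : Int) :
    (pvAppendAt r k f).length = r.length := by
  induction r generalizing k with
  | nil => rfl
  | cons b bs ih => cases k with
    | zero => rfl
    | succ k => simp [pvAppendAt, ih]

theorem pvAppendAt_getD (r : List (List Int)) (k : Nat) (f : Int) (u : Nat) (hk : k < r.length) :
    (pvAppendAt r k f).getD u [] = if u = k then r.getD u [] ++ [f] else r.getD u [] := by
  induction r generalizing k u with
  | nil => simp at hk
  | cons b bs ih =>
    cases k with
    | zero =>
      cases u with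
      | zero => simp [pvAppendAt]
      | succ u => simp [pvAppendAt]
    | succ k =>
      cases u with
      | zero => simp [pvAppendAt]
      | succ u =>
        simp only [pvAppendAt, List.getD_cons_succ, Nat.add_right_cancel_iff]
        exact ih k u (by simpa using hk)

-- the deduplicated inner loop of pvAddFace, on any nodup list ds
theorem pvFoldUpd_getD (ds : List Int) (r : List (List Int)) (n : Nat) (f : Int) (u : Nat)
    (hn : r.length = n) (hnd : ds.Nodup) (hu : u < n) :
    (ds.foldl (fun r v => if 0 ≤ v ∧ v < (n : Int) then pvAppendAt r v.toNat f else r) r).getD u []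
      = if (u : Int) ∈ ds then r.getD u [] ++ [f] else r.getD u [] := by
  induction ds generalizing r with
  | nil => simp
  | cons v t ih =>
    rcases List.nodup_cons.mp hnd with ⟨hvt, hnd'⟩
    simp only [List.foldl_cons]
    by_cases hv : 0 ≤ v ∧ v < (n : Int)
    · rw [if_pos hv]
      have hlen : (pvAppendAt r v.toNat f).length = n := by rw [pvAppendAt_length, hn]
      rw [ih _ hlen hnd']
      rw [pvAppendAt_getD r v.toNat f u (by omega)]
      by_cases huv : (u : Int) = v
      · have hut : (u : Int) ∉ t := huv ▸ hvt
        rw [if_neg hut, if_pos (by omega : u = v.toNat)]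
        rw [if_pos (show (u : Int) ∈ v :: t by simp [huv])]
      · rw [if_neg (by omega : ¬ u = v.toNat)]
        simp only [List.mem_cons, huv, false_or]
    · rw [if_neg hv]
      rw [ih _ hn hnd']
      have huv : (u : Int) ≠ v := by omega
      simp only [List.mem_cons, huv, false_or]

theorem pvFoldUpd_length (ds : List Int) (r : List (List Int)) (n : Nat) (f : Int) :
    (ds.foldl (fun r v => if 0 ≤ v ∧ v < (n : Int) then pvAppendAt r v.toNat f else r) r).length
      = r.length := by
  induction ds generalizing r with
  | nil => rfl
  | cons v t ih =>
    simp only [List.foldl_cons]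
    by_cases hv : 0 ≤ v ∧ v < (n : Int)
    · rw [if_pos hv, ih, pvAppendAt_length]
    · rw [if_neg hv, ih]

theorem pvAddFace_getD (n : Nat) (r : List (List Int)) (f : Int) (face : List Int) (u : Nat)
    (hn : r.length = n) (hu : u < n) :
    (pvAddFace n r f face).getD u []
      = if (u : Int) ∈ face then r.getD u [] ++ [f] else r.getD u [] := by
  unfold pvAddFace
  rw [pvFoldUpd_getD _ _ _ _ _ hn (PySem.List.nodup_dedup face) hu]
  simp

theorem pvAddFace_length (n : Nat) (r : List (List Int)) (f : Int) (face : List Int) :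
    (pvAddFace n r f face).length = r.length := pvFoldUpd_length _ _ _ _

theorem pvBgo_length (fs : List (List Int)) (n : Nat) (s : Int) (r : List (List Int)) :
    ((PySem.List.enumerate fs s).foldl (fun r p => pvAddFace n r p.1 p.2) r).length = r.length := by
  induction fs generalizing s r with
  | nil => rfl
  | cons face fs ih =>
    rw [PySem.List.enumerate_cons]
    simp only [List.foldl_cons]
    rw [ih, pvAddFace_length]

theorem pvMap_succ_shift (L : List Nat) (s : Int) :
    (L.map Nat.succ).map (fun (j : Nat) => s + (j : Int))
      = L.map (fun (j : Nat) => (s + 1) + (j : Int)) := by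
  rw [List.map_map]
  apply List.map_congr_left
  intro j hj
  simp only [Function.comp_apply, Nat.succ_eq_add_one]
  push_cast
  ring

theorem pvBgo_getD (fs : List (List Int)) (n : Nat) (s : Int) (r : List (List Int)) (u : Nat)
    (hn : r.length = n) (hu : u < n) :
    ((PySem.List.enumerate fs s).foldl (fun r p => pvAddFace n r p.1 p.2) r).getD u []
      = r.getD u [] ++
        ((List.range fs.length).filter (fun (j : Nat) => (fs.getD j []).contains ((u : Nat) : Int))).map
          (fun (j : Nat) => s + (j : Int)) := by
  induction fs generalizing s r with
  | nil => simp
  | cons face fs ih =>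
    rw [PySem.List.enumerate_cons]
    simp only [List.foldl_cons]
    have hlen : (pvAddFace n r s face).length = n := by rw [pvAddFace_length, hn]
    rw [ih (s + 1) _ hlen, pvAddFace_getD n r s face u hn hu]
    have hf : ((List.range fs.length).filter
          ((fun (j : Nat) => (((face :: fs).getD j []).contains ((u : Nat) : Int))) ∘ Nat.succ))
        = (List.range fs.length).filter (fun (j : Nat) => ((fs.getD j []).contains ((u : Nat) : Int))) := by
      apply List.filter_congr
      intro j hj
      simp [Function.comp]
    simp only [List.length_cons, List.range_succ_eq_map, List.filter_cons, List.getD_cons_zero,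
      List.filter_map]
    by_cases hmem : (u : Int) ∈ face
    · have hc : face.contains ((u : Nat) : Int) = true := by simp [hmem]
      simp only [hc]
      rw [if_pos hmem, if_pos trivial, hf, List.map_cons, pvMap_succ_shift]
      simp [List.append_assoc]
    · have hc : face.contains ((u : Nat) : Int) = false := by simp [hmem]
      simp only [hc]
      rw [if_neg hmem, if_neg (show ¬ (false = true) by simp), hf, pvMap_succ_shift]

-- A's result, in closed form
theorem pvA_eq (vertices : List Int) (faces : List (List Int)) :
    get_faces_of_vertices vertices faces
      = (List.range vertices.length).map (fun (v : Nat) =>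
          ((List.range faces.length).filter (fun (j : Nat) => (faces.getD j []).contains ((v : Nat) : Int))).map
            (fun (j : Nat) => ((j : Nat) : Int))) := by
  unfold get_faces_of_vertices
  rw [PySem.List.pyRange_one, PySem.List.pyRange_one]
  rw [PySem.List.foldl_append_singleton_eq_map]
  simp only [List.nil_append, Int.sub_zero, Int.toNat_natCast, zero_add, List.map_map]
  apply List.map_congr_left
  intro k hk
  simp only [Function.comp_apply]
  rw [List.foldl_map, PySem.List.foldl_append_if]
  simp [PySem.List.pyGetD_natCast]

-- ===== VERDICT (by name: the statement is the Claim_ definition above) =====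
theorem get_faces_of_vertices_spec : Claim_equal_get_faces_of_vertices := by
  intro vertices faces _
  unfold Spec_get_faces_of_vertices
  rw [pvA_eq]
  unfold get_faces_of_vertices_alt
  apply List.ext_getElem
  · rw [pvBgo_length]
    simp
  · intro i h1 h2
    have hi : i < vertices.length := by simpa using h1
    have hB := pvBgo_getD faces vertices.length 0 (List.replicate vertices.length []) i
      (by simp) hi
    rw [List.getD_eq_getElem _ _ h2] at hB
    rw [hB]
    simp
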